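-- pv_equiv track=rewrite | github.com/fernandobusta/CA117 | doubles_112.py | double_v
-- ===== SOURCE A (Python) =====
-- def double_v(words):
--     counter = {}
--     vowels = ['aa', 'ee', 'ii', 'oo', 'uu']
--     for w in words:
--         counter[w] = 0
--     for w in words:
--         current = w
--         for v in vowels:
--             state = v in current
--             while state is True:
--                 #add 1 to the counter
--                 counter[w] += 1
--                 #get rid of v iside the word
--                 current = current.replace(v, '', 1)
--                 #update the state if there is no more
--                 if v not in current:
--                     state = False
--     return max(counter, key=counter.get)
-- ===== SOURCE B (Python) =====
-- def word_count(w):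
--     # one left-to-right stack scan per vowel pass (same pass order as A:
--     # 'aa','ee','ii','oo','uu'); each pass removes all double-vowel pairs in
--     # a single sweep.
--     current = w
--     total = 0
--     for v in "aeiou":
--         stack = []
--         for ch in current:
--             if stack and stack[-1] == v and ch == v:
--                 stack.pop()
--                 total += 1
--             else:
--                 stack.append(ch)
--         current = ''.join(stack)
--     return total
--
--
-- def double_v(words):
--     counter = {}
--     for w in words:
--         counter[w] = counter.get(w, 0) + word_count(w)
--     return max(counter, key=counter.get)
-- ===== Notes on version B (the rewrite author's own statement) =====
-- stated objective: alternative
-- what changed: Each vowel pass is a single left-to-right stack scan (pop-and-count on a doubled vowel) instead of A's repeated `v in current` / `current.replace(v, '', 1)` full-string rescans, and the per-word count is computed once by a helper and accumulated with counter.get(w, 0) + count instead of being re-derived by in-place dict increments.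
import Mathlib
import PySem

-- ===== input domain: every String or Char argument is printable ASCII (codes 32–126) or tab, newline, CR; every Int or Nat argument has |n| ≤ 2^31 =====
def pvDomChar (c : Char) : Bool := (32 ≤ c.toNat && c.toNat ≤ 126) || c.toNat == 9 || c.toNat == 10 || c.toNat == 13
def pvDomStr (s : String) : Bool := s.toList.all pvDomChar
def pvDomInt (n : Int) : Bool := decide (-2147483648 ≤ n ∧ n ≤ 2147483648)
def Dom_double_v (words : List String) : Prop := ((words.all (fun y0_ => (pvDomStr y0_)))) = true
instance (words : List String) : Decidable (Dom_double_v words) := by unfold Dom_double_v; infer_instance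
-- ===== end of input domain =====

-- B replaces A's repeated `v in current` / `replace(v,'',1)` rescans by one
-- left-to-right stack scan per vowel pass (objective: alternative algorithm;
-- same return value wherever A returns).

-- ===== PORT A =====
-- current.replace(sub, '', 1): remove the first occurrence of sub (exact for nonempty sub;
-- A only uses the nonempty patterns 'aa','ee','ii','oo','uu')
def replaceOnce (sub : List Char) : List Char → List Char
  | [] => []
  | c :: t => if sub.isPrefixOf (c :: t) then (c :: t).drop sub.length else c :: replaceOnce sub t

-- termination of A's while loop: removing a present occurrence shortens the string
lemma replaceOnce_length_lt (v : Char) (s : List Char)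
    (h : PySem.Chars.isIn [v, v] s = true) : (replaceOnce [v, v] s).length < s.length := by
  rw [PySem.Chars.isIn_iff_infix] at h
  induction s with
  | nil => simp at h
  | cons c t ih =>
    rw [replaceOnce]
    split
    · simp
    · rename_i hp
      have hinf : [v, v] <:+: t := by
        rcases List.infix_cons_iff.mp h with h1 | h1
        · exact absurd (List.isPrefixOf_iff_prefix.mpr h1) (by simpa using hp)
        · exact h1
      have := ih hinf
      simpa using Nat.succ_lt_succ this

-- A's inner `while state is True:` loop for one vowel pair vv; counter[w] += 1 each
-- iteration, current = current.replace(vv, '', 1)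
def whileA (v : Char) (w : String) (current : List Char) (d : PySem.Dict String Int) :
    List Char × PySem.Dict String Int :=
  if h : PySem.Chars.isIn [v, v] current = true then
    whileA v w (replaceOnce [v, v] current) (d.modify w 0 (· + 1))
  else (current, d)
termination_by current.length
decreasing_by exact replaceOnce_length_lt v current h

-- vowels = ['aa', 'ee', 'ii', 'oo', 'uu']; each two-char pair vv is represented by its letter v
def vowelsA : List Char := ['a', 'e', 'i', 'o', 'u']

def double_v (words : List String) : String :=
  -- for w in words: counter[w] = 0
  let counter0 : PySem.Dict String Int := words.foldl (fun d w => d.insert w 0) PySem.Dict.empty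
  -- for w in words: current = w; for v in vowels: while loop
  let counter := words.foldl (fun d w =>
    (vowelsA.foldl (fun (st : List Char × PySem.Dict String Int) v => whileA v w st.1 st.2)
      (w.toList, d)).2) counter0
  -- max(counter, key=counter.get)
  match PySem.List.max? counter.keys (fun k => counter.getD k 0) with
  | some m => m
  | none => ""   -- Python raises ValueError here (empty input); excluded by Pre_double_v

-- ===== PORT B =====
-- one stack step: if stack and stack[-1] == v and ch == v: pop, count += 1 else push
-- (stack top kept at the head; ''.join(stack) is the reversal)
def scanStep (v : Char) (st : List Char × Int) (ch : Char) : List Char × Int :=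
  match st with
  | (top :: rest, n) => if top == v && ch == v then (rest, n + 1) else (ch :: top :: rest, n)
  | ([], n) => ([ch], n)

-- one vowel pass: scan current once, return (new current, pairs removed)
def scanV (v : Char) (cs : List Char) : List Char × Int :=
  let r := cs.foldl (scanStep v) ([], 0)
  (r.1.reverse, r.2)

-- for v in "aeiou"
def vowelsB : List Char := ['a', 'e', 'i', 'o', 'u']

def wordCountB (w : String) : Int :=
  (vowelsB.foldl (fun (st : List Char × Int) v =>
    let r := scanV v st.1
    (r.1, st.2 + r.2)) (w.toList, 0)).2

def double_v_alt (words : List String) : String :=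
  let counter := words.foldl (fun d w => d.insert w (d.getD w 0 + wordCountB w)) PySem.Dict.empty
  match PySem.List.max? counter.keys (fun k => counter.getD k 0) with
  | some m => m
  | none => ""

-- ===== PRECONDITION & SPEC =====
-- Pre_ excludes only the empty list, on which A's max() raises ValueError.
def Pre_double_v (words : List String) : Prop := words ≠ []
instance (words : List String) : Decidable (Pre_double_v words) := by
  unfold Pre_double_v; infer_instance

def pvWitness_double_v : List String := ["aa"]

def Spec_double_v (words : List String) (out : String) : Prop := out = double_v_alt words
instance (words : List String) (out : String) : Decidable (Spec_double_v words out) := by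
  unfold Spec_double_v; infer_instance

-- ===== CLAIM (what is proved, stated in full; the proofs are below) =====
def Claim_equal_double_v : Prop :=
  ∀ (words : List String), Dom_double_v words → Pre_double_v words →
    Spec_double_v words (double_v words)

-- ===== LEMMAS AND PROOFS =====
-- counter[w] += 1 performed k times
def repFold (k : Nat) (w : String) (d : PySem.Dict String Int) : PySem.Dict String Int :=
  (List.replicate k w).foldl (fun d x => d.modify x 0 (· + 1)) d

lemma repFold_add (a b : Nat) (w : String) (d : PySem.Dict String Int) :
    repFold (a + b) w d = repFold b w (repFold a w d) := by
  unfold repFold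
  rw [List.replicate_add, List.foldl_append]

-- the count accumulator only grows
lemma scan_le (v : Char) : ∀ (l : List Char) (s : List Char) (n : Int),
    n ≤ (List.foldl (scanStep v) (s, n) l).2 := by
  intro l
  induction l with
  | nil => intro s n; simp
  | cons c t ih =>
    intro s n
    simp only [List.foldl_cons]
    match s with
    | [] => simpa [scanStep] using ih [c] n
    | top :: rest =>
      by_cases h : (top == v && c == v) = true
      · simp only [scanStep, h, if_true]
        exact le_trans (by omega) (ih rest (n + 1))
      · simp only [scanStep, h, if_false]
        exact ih (c :: top :: rest) n

-- the stack component ignores the count; the count is an offset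
lemma scan_off (v : Char) : ∀ (l : List Char) (s : List Char) (n : Int),
    List.foldl (scanStep v) (s, n + 1) l =
      ((List.foldl (scanStep v) (s, n) l).1, (List.foldl (scanStep v) (s, n) l).2 + 1) := by
  intro l
  induction l with
  | nil => intro s n; simp
  | cons c t ih =>
    intro s n
    simp only [List.foldl_cons]
    match s with
    | [] => simpa [scanStep] using ih [c] n
    | top :: rest =>
      by_cases h : (top == v && c == v) = true
      · simp only [scanStep, h, if_true]
        exact ih rest (n + 1)
      · simp only [scanStep, h, if_false]
        exact ih (c :: top :: rest) n

-- no vv in the input (and none straddling the stack top): everything is pushed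
lemma scan_nopair (v : Char) : ∀ (l : List Char) (s : List Char) (n : Int),
    ¬([v, v] <:+: l) → ¬(s.head? = some v ∧ l.head? = some v) →
    List.foldl (scanStep v) (s, n) l = (l.reverse ++ s, n) := by
  intro l
  induction l with
  | nil => intro s n _ _; simp
  | cons c t ih =>
    intro s n hl hh
    have htail : ¬([v, v] <:+: t) := fun hp => hl (List.infix_cons hp)
    have hct : ¬(c = v ∧ t.head? = some v) := by
      rintro ⟨rfl, hhd⟩
      rcases t with _ | ⟨c2, t2⟩
      · simp at hhd
      · simp at hhd
        subst hhd
        exact hl ⟨[], t2, rfl⟩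
    simp only [List.foldl_cons]
    match s with
    | [] =>
      rw [show scanStep v ([], n) c = ([c], n) from rfl]
      rw [ih [c] n htail (by
        rintro ⟨h1, h2⟩
        simp at h1 h2
        exact hct ⟨h1, h2⟩)]
      simp
    | top :: rest =>
      have hb : (top == v && c == v) = false := by
        by_cases h1 : top = v
        · by_cases h2 : c = v
          · exact absurd ⟨by simp [h1], by simp [h2]⟩ hh
          · simp [h2]
        · simp [h1]
      rw [show scanStep v (top :: rest, n) c = (c :: top :: rest, n) by simp [scanStep, hb]]
      rw [ih (c :: top :: rest) n htail (by
        rintro ⟨h1, h2⟩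
        simp at h1 h2
        exact hct ⟨h1, h2⟩)]
      simp

-- the stack never acquires an adjacent vv
lemma scan_stack_nopair (v : Char) : ∀ (l : List Char) (s : List Char) (n : Int),
    ¬([v, v] <:+: s) → ¬([v, v] <:+: (List.foldl (scanStep v) (s, n) l).1) := by
  intro l
  induction l with
  | nil => intro s n hs; simpa using hs
  | cons c t ih =>
    intro s n hs
    simp only [List.foldl_cons]
    match s with
    | [] =>
      refine ih [c] n ?_
      intro h
      have := h.length_le
      simp at this
    | top :: rest =>
      by_cases h : (top == v && c == v) = true
      · simp only [scanStep, h, if_true]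
        exact ih rest (n + 1) (fun hp => hs (List.infix_cons hp))
      · simp only [scanStep, h, if_false]
        refine ih (c :: top :: rest) n ?_
        intro hp
        rcases List.infix_cons_iff.mp hp with h1 | h1
        · rcases h1 with ⟨u, hu⟩
          simp at hu
          obtain ⟨rfl, rfl, -⟩ := hu
          simp at h
        · exact hs h1

-- scanning a vv from a vv-free stack: stack returns to itself, count + 1
lemma scan_pair_ins (v : Char) (y : List Char) (s : List Char) (n : Int)
    (hs : ¬([v, v] <:+: s)) :
    List.foldl (scanStep v) (s, n) (v :: v :: y) = List.foldl (scanStep v) (s, n + 1) y := by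
  rcases s with _ | ⟨top, rest⟩
  · simp only [List.foldl_cons]
    rw [show scanStep v ([], n) v = ([v], n) from rfl]
    rw [show scanStep v ([v], n) v = ([], n + 1) by simp [scanStep]]
  · by_cases htop : top = v
    · simp only [List.foldl_cons]
      rw [show scanStep v (top :: rest, n) v = (rest, n + 1) by simp [scanStep, htop]]
      rcases rest with _ | ⟨r0, rr⟩
      · rw [show scanStep v ([], n + 1) v = ([v], n + 1) from rfl]
        simp [htop]
      · have hr0 : r0 ≠ v := by
          intro hr
          exact hs ⟨[], rr, by simp [htop, hr]⟩
        rw [show scanStep v (r0 :: rr, n + 1) v = (v :: r0 :: rr, n + 1) by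
          simp [scanStep, hr0]]
        simp [htop]
    · simp only [List.foldl_cons]
      rw [show scanStep v (top :: rest, n) v = (v :: top :: rest, n) by simp [scanStep, htop]]
      rw [show scanStep v (v :: top :: rest, n) v = (top :: rest, n + 1) by simp [scanStep]]

-- deleting any one vv occurrence lowers the scan count by exactly one
lemma scan_insert (v : Char) (x y : List Char) (n : Int) :
    List.foldl (scanStep v) ([], n) (x ++ v :: v :: y) =
      ((List.foldl (scanStep v) ([], n) (x ++ y)).1,
       (List.foldl (scanStep v) ([], n) (x ++ y)).2 + 1) := by
  rw [List.foldl_append, List.foldl_append]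
  have hnil : ¬([v, v] <:+: ([] : List Char)) := by
    intro h; have := h.length_le; simp at this
  have hs := scan_stack_nopair v x [] n hnil
  have := scan_pair_ins v y (List.foldl (scanStep v) ([], n) x).1
    (List.foldl (scanStep v) ([], n) x).2 hs
  rw [show List.foldl (scanStep v) ([], n) x =
    ((List.foldl (scanStep v) ([], n) x).1, (List.foldl (scanStep v) ([], n) x).2) from rfl,
    this, scan_off]

-- replaceOnce removes the first occurrence: a decomposition
lemma replaceOnce_decomp (v : Char) : ∀ (s : List Char), [v, v] <:+: s →
    ∃ x y, s = x ++ v :: v :: y ∧ replaceOnce [v, v] s = x ++ y := by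
  intro s
  induction s with
  | nil => intro h; exact absurd (List.eq_nil_of_infix_nil h) (by simp)
  | cons c t ih =>
    intro h
    by_cases hp : ([v, v] : List Char).isPrefixOf (c :: t) = true
    · rcases List.isPrefixOf_iff_prefix.mp hp with ⟨u, hu⟩
      refine ⟨[], u, by simpa using hu.symm, ?_⟩
      rw [replaceOnce, if_pos hp]
      rw [← hu]
      simp
    · have hinf : [v, v] <:+: t := by
        rcases List.infix_cons_iff.mp h with h1 | h1
        · exact absurd (List.isPrefixOf_iff_prefix.mpr h1) hp
        · exact h1
      obtain ⟨x, y, h1, h2⟩ := ih hinf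
      refine ⟨c :: x, y, by simp [h1], ?_⟩
      rw [replaceOnce, if_neg hp, h2]
      simp

-- the heart: A's while loop = B's single stack scan
lemma whileA_eq_aux (v : Char) (w : String) : ∀ (n : Nat) (c : List Char), c.length ≤ n →
    ∀ (d : PySem.Dict String Int),
    whileA v w c d = ((scanV v c).1, repFold (scanV v c).2.toNat w d) := by
  intro n
  induction n with
  | zero =>
    intro c hc d
    have : c = [] := List.length_eq_zero_iff.mp (Nat.le_zero.mp hc)
    subst this
    have h : ¬ PySem.Chars.isIn [v, v] ([] : List Char) = true := by
      rw [Bool.not_eq_true, PySem.Chars.isIn_eq_false_iff]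
      intro hh
      have := hh.length_le
      simp at this
    rw [whileA, dif_neg h]
    simp [scanV, repFold]
  | succ n ih =>
    intro c hc d
    by_cases h : PySem.Chars.isIn [v, v] c = true
    · obtain ⟨x, y, hcdec, hrepl⟩ := replaceOnce_decomp v c ((PySem.Chars.isIn_iff_infix _ _).mp h)
      rw [whileA, dif_pos h, hrepl]
      have hlen : (x ++ y).length ≤ n := by
        subst hcdec; simp at hc ⊢; omega
      rw [ih (x ++ y) hlen]
      have hins := scan_insert v x y 0
      have h1 : (scanV v c).1 = (scanV v (x ++ y)).1 := by
        subst hcdec; simp [scanV, hins]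
      have h2 : (scanV v c).2 = (scanV v (x ++ y)).2 + 1 := by
        subst hcdec; simp [scanV, hins]
      rw [h1, h2]
      have hk : 0 ≤ (scanV v (x ++ y)).2 := by
        simpa [scanV] using scan_le v (x ++ y) [] 0
      have ht : ((scanV v (x ++ y)).2 + 1).toNat = (scanV v (x ++ y)).2.toNat + 1 := by omega
      rw [ht]
      simp [repFold, List.replicate_succ]
    · rw [whileA, dif_neg h]
      have hnp : ¬ [v, v] <:+: c :=
        (PySem.Chars.isIn_eq_false_iff _ _).mp (Bool.not_eq_true _ ▸ h)
      have hscan := scan_nopair v c [] 0 hnp (by simp)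
      simp [scanV, hscan, repFold]

lemma whileA_eq (v : Char) (w : String) (c : List Char) (d : PySem.Dict String Int) :
    whileA v w c d = ((scanV v c).1, repFold (scanV v c).2.toNat w d) :=
  whileA_eq_aux v w c.length c le_rfl d

-- B's five-vowel fold: the total is an offset
lemma chainB_off : ∀ (vl : List Char) (c : List Char) (t : Int),
    List.foldl (fun (st : List Char × Int) v =>
        ((scanV v st.1).1, st.2 + (scanV v st.1).2)) (c, t) vl =
      ((List.foldl (fun (st : List Char × Int) v =>
          ((scanV v st.1).1, st.2 + (scanV v st.1).2)) (c, 0) vl).1,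
       t + (List.foldl (fun (st : List Char × Int) v =>
          ((scanV v st.1).1, st.2 + (scanV v st.1).2)) (c, 0) vl).2) := by
  intro vl
  induction vl with
  | nil => intro c t; simp
  | cons u vl ih =>
    intro c t
    simp only [List.foldl_cons]
    rw [ih ((scanV u c).1) (t + (scanV u c).2), ih ((scanV u c).1) (0 + (scanV u c).2)]
    exact Prod.ext rfl (by ring)

lemma chainB_nonneg : ∀ (vl : List Char) (c : List Char),
    0 ≤ (List.foldl (fun (st : List Char × Int) v =>
        ((scanV v st.1).1, st.2 + (scanV v st.1).2)) (c, 0) vl).2 := by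
  intro vl
  induction vl with
  | nil => intro c; simp
  | cons u vl ih =>
    intro c
    simp only [List.foldl_cons]
    rw [chainB_off vl ((scanV u c).1) (0 + (scanV u c).2)]
    have h1 : 0 ≤ (scanV u c).2 := by simpa [scanV] using scan_le u c [] 0
    have h2 := ih ((scanV u c).1)
    simp only
    linarith

-- the chained vowel passes agree, with the dict receiving the total count
lemma chain_main (w : String) : ∀ (vl : List Char) (c : List Char) (d : PySem.Dict String Int),
    List.foldl (fun (st : List Char × PySem.Dict String Int) v => whileA v w st.1 st.2) (c, d) vl =
      ((List.foldl (fun (st : List Char × Int) v =>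
          ((scanV v st.1).1, st.2 + (scanV v st.1).2)) (c, 0) vl).1,
       repFold ((List.foldl (fun (st : List Char × Int) v =>
          ((scanV v st.1).1, st.2 + (scanV v st.1).2)) (c, 0) vl).2).toNat w d) := by
  intro vl
  induction vl with
  | nil => intro c d; simp [repFold]
  | cons u vl ih =>
    intro c d
    simp only [List.foldl_cons]
    rw [whileA_eq u w c d, ih]
    rw [chainB_off vl ((scanV u c).1) (0 + (scanV u c).2)]
    have h1 : 0 ≤ (scanV u c).2 := by simpa [scanV] using scan_le u c [] 0
    have h2 := chainB_nonneg vl ((scanV u c).1)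
    refine Prod.ext rfl ?_
    simp only
    have ht : ((0 + (scanV u c).2) +
        (List.foldl (fun (st : List Char × Int) v =>
          ((scanV v st.1).1, st.2 + (scanV v st.1).2)) ((scanV u c).1, 0) vl).2).toNat =
        (scanV u c).2.toNat +
        ((List.foldl (fun (st : List Char × Int) v =>
          ((scanV v st.1).1, st.2 + (scanV v st.1).2)) ((scanV u c).1, 0) vl).2).toNat := by
      omega
    rw [ht, repFold_add]

lemma wordCountB_nonneg (w : String) : 0 ≤ wordCountB w := by
  simpa [wordCountB] using chainB_nonneg vowelsB w.toList

-- A's inner two loops for one word add wordCountB w to counter[w]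
lemma A_inner (w : String) (d : PySem.Dict String Int) :
    (vowelsA.foldl (fun (st : List Char × PySem.Dict String Int) v => whileA v w st.1 st.2)
      (w.toList, d)).2 = repFold (wordCountB w).toNat w d := by
  rw [chain_main w vowelsA w.toList d]
  simp [wordCountB, vowelsA, vowelsB]

-- A's word loop, flattened to a single modify loop
lemma A_flat : ∀ (l : List String) (d : PySem.Dict String Int),
    l.foldl (fun d w => repFold (wordCountB w).toNat w d) d =
      (l.flatMap (fun w => List.replicate (wordCountB w).toNat w)).foldl
        (fun d x => d.modify x 0 (· + 1)) d := by
  intro l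
  induction l with
  | nil => intro d; simp
  | cons w l ih =>
    intro d
    simp only [List.foldl_cons, List.flatMap_cons, List.foldl_append]
    rw [ih]
    rfl

-- all values of the zero-initialised dict are 0
lemma getD_init : ∀ (l : List String) (d : PySem.Dict String Int) (x : String),
    d.getD x 0 = 0 → (l.foldl (fun d w => d.insert w 0) d).getD x 0 = 0 := by
  intro l
  induction l with
  | nil => intro d x h; simpa using h
  | cons w l ih =>
    intro d x h
    simp only [List.foldl_cons]
    refine ih _ x ?_
    rw [PySem.Dict.getD_insert]
    split_ifs <;> simp [h]

lemma count_flat : ∀ (l : List String) (x : String),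
    (l.flatMap (fun w => List.replicate (wordCountB w).toNat w)).count x =
      l.count x * (wordCountB x).toNat := by
  intro l
  induction l with
  | nil => intro x; simp
  | cons w l ih =>
    intro x
    simp only [List.flatMap_cons, List.count_append, ih, List.count_cons, List.count_replicate]
    by_cases hxw : x = w
    · subst hxw; simp [Nat.add_mul, Nat.add_comm]
    · have h1 : ¬ (w = x) := fun h => hxw h.symm
      simp [hxw, h1]

-- B's dict values
lemma getD_B : ∀ (l : List String) (d : PySem.Dict String Int) (x : String),
    (l.foldl (fun d w => d.insert w (d.getD w 0 + wordCountB w)) d).getD x 0 =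
      d.getD x 0 + (l.count x : Int) * wordCountB x := by
  intro l
  induction l with
  | nil => intro d x; simp
  | cons w l ih =>
    intro d x
    simp only [List.foldl_cons]
    rw [ih]
    rw [PySem.Dict.getD_insert]
    by_cases hxw : x = w
    · subst hxw
      simp only [List.count_cons, BEq.rfl, if_true]
      push_cast
      ring
    · have h1 : ¬ (w = x) := fun h => hxw h.symm
      rw [if_neg hxw]
      simp only [List.count_cons]
      rw [if_neg (by simpa using h1)]
      push_cast
      ring

-- Set.update by elements already present does nothing
lemma update_of_subset : ∀ (xs : List String) (s : PySem.Set String),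
    (∀ x ∈ xs, x ∈ s) → PySem.Set.update s xs = s := by
  intro xs
  induction xs with
  | nil => intro s _; rfl
  | cons x xs ih =>
    intro s h
    have hadd : PySem.Set.add s x = s := by
      unfold PySem.Set.add
      rw [if_pos ((PySem.Set.contains_iff s x).mpr (h x (by simp)))]
    have hstep : PySem.Set.update s (x :: xs) = PySem.Set.update (PySem.Set.add s x) xs := rfl
    rw [hstep, hadd]
    exact ih s (fun y hy => h y (by simp [hy]))

-- the two final dicts are equal
lemma dict_eq (words : List String) :
    words.foldl (fun d w =>
      (vowelsA.foldl (fun (st : List Char × PySem.Dict String Int) v => whileA v w st.1 st.2)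
        (w.toList, d)).2)
      (words.foldl (fun d w => d.insert w 0) PySem.Dict.empty) =
    words.foldl (fun d w => d.insert w (d.getD w 0 + wordCountB w)) PySem.Dict.empty := by
  have hfun : (fun (d : PySem.Dict String Int) (w : String) =>
      (vowelsA.foldl (fun (st : List Char × PySem.Dict String Int) v => whileA v w st.1 st.2)
        (w.toList, d)).2) = fun d w => repFold (wordCountB w).toNat w d := by
    funext d w; exact A_inner w d
  rw [hfun, A_flat]
  have hk0 : (words.foldl (fun d w => d.insert w 0) (PySem.Dict.empty : PySem.Dict String Int)).keys =
      PySem.Set.ofList words := by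
    rw [PySem.Dict.keys_foldl_insert]
    rfl
  have hkA : ((words.flatMap (fun w => List.replicate (wordCountB w).toNat w)).foldl
      (fun d x => d.modify x 0 (· + 1))
      (words.foldl (fun d w => d.insert w 0) (PySem.Dict.empty : PySem.Dict String Int))).keys =
      PySem.Set.ofList words := by
    rw [PySem.Dict.keys_foldl_modify, hk0, update_of_subset]
    intro x hx
    rcases List.mem_flatMap.mp hx with ⟨w, hw, hxw⟩
    have := List.eq_of_mem_replicate hxw
    subst this
    exact (PySem.Set.mem_ofList _ _).mpr hw
  have hkB : (words.foldl (fun d w => d.insert w (d.getD w 0 + wordCountB w))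
      PySem.Dict.empty).keys = PySem.Set.ofList words := by
    rw [PySem.Dict.keys_foldl_insert]
    rfl
  have hgA : ∀ x, ((words.flatMap (fun w => List.replicate (wordCountB w).toNat w)).foldl
      (fun d x => d.modify x 0 (· + 1))
      (words.foldl (fun d w => d.insert w 0) (PySem.Dict.empty : PySem.Dict String Int))).getD x 0 =
      (words.count x : Int) * wordCountB x := by
    intro x
    rw [PySem.Dict.getD_foldl_modify_add_one, getD_init words _ x (by simp), count_flat]
    push_cast [Int.toNat_of_nonneg (wordCountB_nonneg x)]
    ring
  have hgB : ∀ x, (words.foldl (fun d w => d.insert w (d.getD w 0 + wordCountB w))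
      PySem.Dict.empty).getD x 0 = (words.count x : Int) * wordCountB x := by
    intro x
    rw [getD_B]
    simp
  have hndA : ((words.flatMap (fun w => List.replicate (wordCountB w).toNat w)).foldl
      (fun d x => d.modify x 0 (· + 1))
      (words.foldl (fun d w => d.insert w 0) (PySem.Dict.empty : PySem.Dict String Int))).keys.Nodup := by
    rw [hkA]; exact PySem.Set.nodup_ofList _
  have hndB : (words.foldl (fun d w => d.insert w (d.getD w 0 + wordCountB w))
      PySem.Dict.empty).keys.Nodup := by
    rw [hkB]; exact PySem.Set.nodup_ofList _
  have hitA := PySem.Dict.items_eq_map_keys _ hndA 0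
  have hitB := PySem.Dict.items_eq_map_keys _ hndB 0
  apply PySem.Dict.ext
  rw [hitA, hitB, hkA, hkB]
  refine List.map_congr_left ?_
  intro k _
  rw [hgA k, hgB k]

-- ===== VERDICT (by name: the statement is the Claim_ definition above) =====
theorem double_v_spec : Claim_equal_double_v := by
  unfold Claim_equal_double_v
  intro words _ _
  unfold Spec_double_v
  simp only [double_v, double_v_alt]
  rw [dict_eq]
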